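-- pv_equiv track=rewrite | github.com/KHR0907/deploy-hook | main.py | _format_sse
-- ===== SOURCE A (Python) =====
-- def _format_sse(event_type: str, data: str, event_id: int) -> str:
--     parts: list[str] = []
--     if event_id:
--         parts.append(f"id: {event_id}")
--     parts.append(f"event: {event_type}")
--     for line in data.split("\n"):
--         parts.append(f"data: {line}")
--     return "\n".join(parts) + "\n\n"
-- ===== SOURCE B (Python) =====
-- def _format_sse(event_type: str, data: str, event_id: int) -> str:
--     body = "data: " + data.replace("\n", "\ndata: ")
--     head = f"id: {event_id}\n" if event_id else ""
--     return f"{head}event: {event_type}\n{body}\n\n"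
-- ===== Notes on version B (the rewrite author's own statement) =====
-- stated objective: idiomatic
-- what changed: Replaces the list-of-parts accumulation with a per-line loop and final join by a single replace('\n', '\ndata: ') building the data block, assembled with direct string concatenation.
import Mathlib
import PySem

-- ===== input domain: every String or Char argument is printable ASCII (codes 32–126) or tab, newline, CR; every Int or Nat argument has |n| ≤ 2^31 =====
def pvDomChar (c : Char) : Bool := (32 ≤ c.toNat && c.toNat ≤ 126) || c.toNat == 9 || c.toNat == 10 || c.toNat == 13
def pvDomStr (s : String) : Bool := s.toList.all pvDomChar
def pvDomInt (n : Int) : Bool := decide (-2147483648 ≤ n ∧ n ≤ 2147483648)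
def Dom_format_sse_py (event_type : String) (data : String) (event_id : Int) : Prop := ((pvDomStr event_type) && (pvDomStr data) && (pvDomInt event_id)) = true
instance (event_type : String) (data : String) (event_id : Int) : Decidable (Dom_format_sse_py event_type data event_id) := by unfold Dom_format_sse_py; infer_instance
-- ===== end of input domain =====

-- B builds the data block with one replace("\n", "\ndata: ") and direct concatenation instead of A's
-- list-of-parts accumulation, per-line loop and final join; same output, O(n) both (objective: idiomatic).

-- ===== PORT A =====
def format_sse_py (event_type : String) (data : String) (event_id : Int) : String :=
  let parts : List String := []
  let parts := if event_id ≠ 0 then parts ++ ["id: " ++ PySem.Int.toStr event_id] else parts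
  let parts := parts ++ ["event: " ++ event_type]
  -- data.split("\n"): sep is the nonempty literal "\n", so split? is always `some`
  let parts := ((PySem.Str.split? data "\n").getD []).foldl
      (fun ps line => ps ++ ["data: " ++ line]) parts
  PySem.Str.join "\n" parts ++ "\n\n"

-- ===== PORT B =====
def format_sse_py_alt (event_type : String) (data : String) (event_id : Int) : String :=
  let body := "data: " ++ PySem.Str.replace data "\n" "\ndata: "
  let head := if event_id ≠ 0 then "id: " ++ PySem.Int.toStr event_id ++ "\n" else ""
  head ++ "event: " ++ event_type ++ "\n" ++ body ++ "\n\n"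

-- ===== PRECONDITION & SPEC =====
def Spec_format_sse_py (event_type : String) (data : String) (event_id : Int) (out : String) : Prop := out = format_sse_py_alt event_type data event_id
instance (event_type : String) (data : String) (event_id : Int) (out : String) : Decidable (Spec_format_sse_py event_type data event_id out) := by unfold Spec_format_sse_py; infer_instance

-- ===== CLAIM (what is proved, stated in full; the proofs are below) =====
def Claim_equal_format_sse_py : Prop := ∀ (event_type : String) (data : String) (event_id : Int), Dom_format_sse_py event_type data event_id → Spec_format_sse_py event_type data event_id (format_sse_py event_type data event_id)

-- ===== LEMMAS AND PROOFS =====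

-- reference forms of split-on-'\n' and replace-'\n' used to relate the two ports
def mySplit : List Char → List (List Char)
  | [] => [[]]
  | c :: t => if c = '\n' then [] :: mySplit t else (mySplit t).modifyHead (c :: ·)

def myRepl (new : List Char) : List Char → List Char
  | [] => []
  | c :: t => if c = '\n' then new ++ myRepl new t else c :: myRepl new t

theorem mySplit_ne_nil (l : List Char) : mySplit l ≠ [] := by
  cases l with
  | nil => simp [mySplit]
  | cons c t => simp only [mySplit]; split <;> simp [List.modifyHead] <;> split <;> simp_all [mySplit_ne_nil]

theorem splitGo_nil (fuel : Nat) (cur : List Char) (acc : List (List Char)) :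
    PySem.Chars.splitOn.go ['\n'] fuel [] cur acc = acc.reverse ++ [cur.reverse] := by
  cases fuel <;> simp [PySem.Chars.splitOn.go]

theorem splitGo_cons (f : Nat) (c : Char) (t cur : List Char) (acc : List (List Char)) :
    PySem.Chars.splitOn.go ['\n'] (f+1) (c :: t) cur acc
      = if ['\n'].isPrefixOf (c :: t) then PySem.Chars.splitOn.go ['\n'] f t [] (cur.reverse :: acc)
        else PySem.Chars.splitOn.go ['\n'] f t (c :: cur) acc := rfl

theorem replGo_nil (new : List Char) (fuel : Nat) (acc : List Char) :
    PySem.Chars.replace.go ['\n'] new fuel [] acc = acc.reverse := by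
  cases fuel <;> simp [PySem.Chars.replace.go]

theorem replGo_cons (new : List Char) (f : Nat) (c : Char) (t acc : List Char) :
    PySem.Chars.replace.go ['\n'] new (f+1) (c :: t) acc
      = if ['\n'].isPrefixOf (c :: t) then PySem.Chars.replace.go ['\n'] new f t (new.reverse ++ acc)
        else PySem.Chars.replace.go ['\n'] new f t (c :: acc) := rfl

theorem go_split (l : List Char) : ∀ (fuel : Nat) (cur : List Char) (acc : List (List Char)), l.length ≤ fuel →
    PySem.Chars.splitOn.go ['\n'] fuel l cur acc
      = acc.reverse ++ ((mySplit l).modifyHead (cur.reverse ++ ·)) := by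
  induction l with
  | nil => intro fuel cur acc _; simp [splitGo_nil, mySplit]
  | cons c t ih =>
    intro fuel cur acc h
    simp only [List.length_cons] at h
    cases fuel with
    | zero => omega
    | succ f =>
      rw [splitGo_cons]
      by_cases hc : c = '\n'
      · subst hc
        rw [if_pos (by simp [List.isPrefixOf])]
        rw [ih f [] (cur.reverse :: acc) (by omega)]
        rcases hms : mySplit t with _ | ⟨hd, tl⟩
        · exact absurd hms (mySplit_ne_nil t)
        · simp [mySplit, List.modifyHead, hms]
      · rw [if_neg (by simp [List.isPrefixOf]; exact fun h => hc h.symm)]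
        rw [ih f (c :: cur) acc (by omega)]
        simp only [mySplit, if_neg hc]
        rcases hms : mySplit t with _ | ⟨hd, tl⟩
        · exact absurd hms (mySplit_ne_nil t)
        · simp [List.modifyHead]

theorem split_newline (l : List Char) : PySem.Chars.splitOn l ['\n'] = mySplit l := by
  rw [PySem.Chars.splitOn, go_split l (l.length + 1) [] [] (by omega)]
  rcases hms : mySplit l with _ | ⟨hd, tl⟩
  · exact absurd hms (mySplit_ne_nil l)
  · simp [List.modifyHead]

theorem go_repl (new : List Char) (l : List Char) : ∀ (fuel : Nat) (acc : List Char), l.length ≤ fuel →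
    PySem.Chars.replace.go ['\n'] new fuel l acc = acc.reverse ++ myRepl new l := by
  induction l with
  | nil => intro fuel acc _; simp [replGo_nil, myRepl]
  | cons c t ih =>
    intro fuel acc h
    simp only [List.length_cons] at h
    cases fuel with
    | zero => omega
    | succ f =>
      rw [replGo_cons]
      by_cases hc : c = '\n'
      · subst hc
        rw [if_pos (by simp [List.isPrefixOf])]
        rw [ih f (new.reverse ++ acc) (by omega)]
        simp [myRepl]
      · rw [if_neg (by simp [List.isPrefixOf]; exact fun h => hc h.symm)]
        rw [ih f (c :: acc) (by omega)]
        simp [myRepl, hc]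

theorem repl_newline (new l : List Char) : PySem.Chars.replace l ['\n'] new = myRepl new l := by
  rw [PySem.Chars.replace]
  simp only [List.isEmpty_cons, Bool.false_eq_true, if_false]
  exact go_repl new l l.length [] le_rfl

theorem interc_cons_cons (sep x y : List Char) (tl : List (List Char)) :
    sep.intercalate (x :: y :: tl) = x ++ sep ++ sep.intercalate (y :: tl) := by
  simp [List.intercalate, List.intersperse]

theorem myRepl_eq_intercalate (new l : List Char) : myRepl new l = new.intercalate (mySplit l) := by
  induction l with
  | nil => simp [mySplit, myRepl, List.intercalate]
  | cons c t ih =>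
    by_cases hc : c = '\n'
    · subst hc
      simp only [mySplit, myRepl, ih, if_true]
      rcases hms : mySplit t with _ | ⟨hd, tl⟩
      · exact absurd hms (mySplit_ne_nil t)
      · rw [interc_cons_cons]
        simp
    · simp only [mySplit, myRepl, if_neg hc, ih]
      rcases hms : mySplit t with _ | ⟨hd, tl⟩
      · exact absurd hms (mySplit_ne_nil t)
      · cases tl with
        | nil => simp [List.intercalate, List.modifyHead]
        | cons z tl' =>
          simp only [List.modifyHead]
          rw [interc_cons_cons, interc_cons_cons]
          simp

theorem intercalate_map_append (sep pre : List Char) (l : List (List Char)) (h : l ≠ []) :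
    sep.intercalate (l.map (pre ++ ·)) = pre ++ (sep ++ pre).intercalate l := by
  induction l with
  | nil => simp at h
  | cons x tl ih =>
    cases tl with
    | nil => simp [List.intercalate]
    | cons y tl' =>
      simp only [List.map_cons] at ih ⊢
      rw [interc_cons_cons, interc_cons_cons, ih (by simp)]
      simp

-- the heart of the equivalence: joining "data: "-prefixed lines = prefix + replace
theorem key_lemma (dL : List Char) :
    ['\n'].intercalate ((mySplit dL).map (fun x => "data: ".toList ++ x))
      = "data: ".toList ++ PySem.Chars.replace dL ['\n'] ("\ndata: ".toList) := by
  rw [repl_newline, myRepl_eq_intercalate,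
      intercalate_map_append _ _ _ (mySplit_ne_nil dL)]
  rfl

theorem foldl_parts (lines parts : List String) :
    lines.foldl (fun ps line => ps ++ ["data: " ++ line]) parts
      = parts ++ lines.map (fun line => "data: " ++ line) := by
  induction lines generalizing parts with
  | nil => simp
  | cons x tl ih => simp [ih]

theorem split_str (data : String) :
    ∃ ls, PySem.Str.split? data "\n" = some ls ∧ ls.map String.toList = mySplit data.toList := by
  have h := PySem.Str.split?_map data "\n"
  rw [PySem.Chars.split?] at h
  cases hs : PySem.Str.split? data "\n" with
  | none => rw [hs] at h; simp at h
  | some ls =>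
    rw [hs] at h
    refine ⟨ls, rfl, ?_⟩
    rw [if_neg (by simp)] at h
    simp only [Option.map_some] at h
    have : "\n".toList = ['\n'] := rfl
    rw [this] at h
    injection h with h'
    rw [h', split_newline]

theorem str_ext (a b : String) (h : a.toList = b.toList) : a = b :=
  String.toList_inj.mp h

theorem map_toList_data (ls : List String) :
    (ls.map (fun line => "data: " ++ line)).map String.toList
      = (ls.map String.toList).map (fun x => "data: ".toList ++ x) := by
  simp [List.map_map, Function.comp_def]

-- ===== VERDICT (by name: the statement is the Claim_ definition above) =====
theorem format_sse_py_spec : Claim_equal_format_sse_py := by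
  intro event_type data event_id _
  unfold Spec_format_sse_py format_sse_py format_sse_py_alt
  obtain ⟨ls, hs, hls⟩ := split_str data
  rw [hs]
  simp only [Option.getD_some, foldl_parts]
  apply str_ext
  rcases hms : mySplit data.toList with _ | ⟨hd, tl⟩
  · exact absurd hms (mySplit_ne_nil data.toList)
  have hnl : "\n".toList = ['\n'] := rfl
  by_cases hi : event_id ≠ 0
  · rw [if_pos hi, if_pos hi]
    simp only [String.toList_append, PySem.Str.toList_join, PySem.Chars.join,
      List.nil_append, List.singleton_append, List.cons_append, List.map_cons, List.map_nil, List.map_append, map_toList_data, hls, hms, hnl]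
    rw [interc_cons_cons, interc_cons_cons, ← List.map_cons, ← hms, key_lemma]
    simp [PySem.Str.toList_replace, hnl, List.append_assoc]
  · rw [if_neg hi, if_neg hi]
    simp only [String.toList_append, PySem.Str.toList_join, PySem.Chars.join,
      List.nil_append, List.singleton_append, List.cons_append, List.map_cons, List.map_nil, List.map_append, map_toList_data, hls, hms, hnl,
      String.toList_empty]
    rw [interc_cons_cons, ← List.map_cons, ← hms, key_lemma]
    simp [PySem.Str.toList_replace, hnl, List.append_assoc]
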